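-- pv_equiv track=rewrite | github.com/vedk21/leetcode_solutions | array/medium/max_increase_to_keep_city_skyline.py | findMinVertically
-- ===== SOURCE A (Python) =====
-- from typing import List, Dict
--
-- def findMinVertically(grid: List[List[int]]) -> Dict:
--   row = 0
--   buildingHeightDict = {}
--
--   while row < len(grid):
--     col = 0
--     while col < len(grid[row]):
--       colMax, i = 0, 0
--       while i < len(grid):
--         colMax = grid[i][col] if grid[i][col] > colMax else colMax
--         i += 1
--
--       buildingHeightDict[(row, col)] = min(max(grid[row]), colMax)
--       col += 1
--     row += 1
--
--
--   return buildingHeightDict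
-- ===== SOURCE B (Python) =====
-- from typing import List, Dict
--
-- def findMinVertically(grid: List[List[int]]) -> Dict:
--   # One pass per row/column: precompute the row maxima and the column maxima
--   # once, then fill the dictionary by table lookup (O(R*C) instead of O(R^2*C)).
--   if not grid:
--     return {}
--   cols = len(grid[0])
--   if cols == 0:
--     return {}
--   rowMax = [max(r) for r in grid]
--   colMax = []
--   for j in range(cols):
--     cm = 0
--     for r in grid:
--       if r[j] > cm:
--         cm = r[j]
--     colMax.append(cm)
--   return {(i, j): min(rowMax[i], colMax[j])
--           for i in range(len(grid)) for j in range(cols)}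
-- ===== Notes on version B (the rewrite author's own statement) =====
-- stated objective: faster
-- what changed: B precomputes the row maxima and the column maxima once and fills the dictionary by table lookup, instead of rescanning the whole grid for the column maximum at every cell as A does.
import Mathlib
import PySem

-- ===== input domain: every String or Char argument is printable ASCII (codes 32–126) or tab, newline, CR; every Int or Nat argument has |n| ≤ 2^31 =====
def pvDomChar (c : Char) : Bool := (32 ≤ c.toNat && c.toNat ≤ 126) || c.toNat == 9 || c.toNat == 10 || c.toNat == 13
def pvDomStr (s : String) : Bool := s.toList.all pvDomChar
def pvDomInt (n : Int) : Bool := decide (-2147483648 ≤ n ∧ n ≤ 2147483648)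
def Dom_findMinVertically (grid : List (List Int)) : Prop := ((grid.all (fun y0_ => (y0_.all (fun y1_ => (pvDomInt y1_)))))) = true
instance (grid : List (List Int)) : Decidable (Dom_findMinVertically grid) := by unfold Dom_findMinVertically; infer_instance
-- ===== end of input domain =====

-- B precomputes row/column maxima once and fills the table (O(R*C)); A rescans the grid per cell (O(R^2*C)).
-- Both return a dict keyed (row, col); rendered here as a row-major list of (row, col, value) triples (keys are distinct).

-- ===== PORT A =====
-- A's while loops with counters row/col/i become folds over List.range of the same bounds.
def findMinVertically (grid : List (List Int)) : List (Int × Int × Int) :=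
  (List.range grid.length).foldl (fun d (row : Nat) =>
    let grow := grid.getD row []
    (List.range grow.length).foldl (fun d (col : Nat) =>
      let colMax := grid.foldl (fun cm gi =>
        if gi.getD col 0 > cm then gi.getD col 0 else cm) 0
      d ++ [((row : Int), (col : Int), min ((PySem.List.max? grow (fun x => x)).getD 0) colMax)]) d) []

-- ===== PORT B =====
def findMinVertically_alt (grid : List (List Int)) : List (Int × Int × Int) :=
  match grid with
  | [] => []
  | g0 :: _ =>
    let cols := g0.length
    if cols = 0 then [] else
    let rowMax := grid.map (fun r => (PySem.List.max? r (fun x => x)).getD 0)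
    let colMax := (List.range cols).map (fun (j : Nat) =>
      grid.foldl (fun cm r => if r.getD j 0 > cm then r.getD j 0 else cm) 0)
    ((List.range grid.length).map (fun (i : Nat) =>
      (List.range cols).map (fun (j : Nat) =>
        ((i : Int), (j : Int), min (rowMax.getD i 0) (colMax.getD j 0))))).flatten

-- ===== PRECONDITION & SPEC =====
-- Pre_ excludes only ragged grids: there A raises IndexError when the per-cell column scan
-- reads grid[i][col] from a row shorter than the current one.
def Pre_findMinVertically (grid : List (List Int)) : Prop :=
  ∀ r ∈ grid, r.length = (grid.headD []).length
instance (grid : List (List Int)) : Decidable (Pre_findMinVertically grid) := by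
  unfold Pre_findMinVertically; infer_instance
def pvWitness_findMinVertically : List (List Int) := [[3, 0, 8], [2, 4, 5], [9, 2, 6]]

def Spec_findMinVertically (grid : List (List Int)) (out : List (Int × Int × Int)) : Prop := out = findMinVertically_alt grid
instance (grid : List (List Int)) (out : List (Int × Int × Int)) : Decidable (Spec_findMinVertically grid out) := by unfold Spec_findMinVertically; infer_instance

-- ===== CLAIM (what is proved, stated in full; the proofs are below) =====
def Claim_equal_findMinVertically : Prop := ∀ (grid : List (List Int)), Dom_findMinVertically grid → Pre_findMinVertically grid → Spec_findMinVertically grid (findMinVertically grid)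

-- ===== LEMMAS AND PROOFS =====

theorem pv_foldl_append {α β : Type} (g : α → List β) :
    ∀ (l : List α) (d : List β),
      l.foldl (fun d x => d ++ g x) d = d ++ (l.map g).flatten := by
  intro l
  induction l with
  | nil => simp
  | cons x xs ih => intro d; simp [List.foldl, ih]

theorem pv_getD_map {α β : Type} (f : α → β) (l : List α) (i : ℕ) (d : β) (d' : α)
    (h : i < l.length) : (l.map f).getD i d = f (l.getD i d') := by
  simp [List.getD, List.getElem?_map, (List.getElem?_eq_getElem (by simpa using h) : l[i]? = _)]

theorem pv_getD_mem {α : Type} (l : List α) (i : ℕ) (d : α) (h : i < l.length) :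
    l.getD i d ∈ l := by
  rw [List.getD_eq_getElem l d h]; exact List.getElem_mem h

theorem pv_flatten_singleton {α β : Type} (f : α → β) (l : List α) :
    (l.map (fun x => [f x])).flatten = l.map f := by
  induction l with
  | nil => rfl
  | cons x xs ih => simp [ih]

theorem findMinVertically_spec' (grid : List (List Int))
    (hp : Pre_findMinVertically grid) :
    findMinVertically grid = findMinVertically_alt grid := by
  cases grid with
  | nil => rfl
  | cons g0 gs =>
    have hpre : ∀ r ∈ g0 :: gs, r.length = g0.length := by
      intro r hr; simpa using hp r hr
    have hA : findMinVertically (g0 :: gs) =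
        ((List.range (g0 :: gs).length).map (fun (row : ℕ) =>
          (List.range ((g0 :: gs).getD row []).length).map (fun (col : ℕ) =>
            ((row : Int), (col : Int),
              min ((PySem.List.max? ((g0 :: gs).getD row []) (fun x => x)).getD 0)
                ((g0 :: gs).foldl (fun cm gi =>
                  if gi.getD col 0 > cm then gi.getD col 0 else cm) 0))))).flatten := by
      unfold findMinVertically
      have hfun : (fun (d : List (Int × Int × Int)) (row : ℕ) =>
          let grow := (g0 :: gs).getD row []
          (List.range grow.length).foldl (fun d (col : ℕ) =>
            let colMax := (g0 :: gs).foldl (fun cm gi =>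
              if gi.getD col 0 > cm then gi.getD col 0 else cm) 0
            d ++ [((row : Int), (col : Int),
              min ((PySem.List.max? grow (fun x => x)).getD 0) colMax)]) d)
          = (fun d row => d ++
            (List.range ((g0 :: gs).getD row []).length).map (fun (col : ℕ) =>
              ((row : Int), (col : Int),
                min ((PySem.List.max? ((g0 :: gs).getD row []) (fun x => x)).getD 0)
                  ((g0 :: gs).foldl (fun cm gi =>
                    if gi.getD col 0 > cm then gi.getD col 0 else cm) 0)))) := by
        funext d row
        dsimp only
        rw [pv_foldl_append, pv_flatten_singleton]
      rw [hfun, pv_foldl_append]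
      simp
    rw [hA]
    have hBdef : findMinVertically_alt (g0 :: gs) =
        (if g0.length = 0 then ([] : List (Int × Int × Int)) else
          ((List.range (g0 :: gs).length).map (fun (i : ℕ) =>
            (List.range g0.length).map (fun (j : ℕ) =>
              ((i : Int), (j : Int),
                min (((g0 :: gs).map (fun r => (PySem.List.max? r (fun x => x)).getD 0)).getD i 0)
                  (((List.range g0.length).map (fun (j : ℕ) =>
                    (g0 :: gs).foldl (fun cm r =>
                      if r.getD j 0 > cm then r.getD j 0 else cm) 0)).getD j 0))))).flatten) := rfl
    rw [hBdef]
    by_cases hc : g0.length = 0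
    · rw [if_pos hc]
      apply List.flatten_eq_nil_iff.mpr
      intro l hl
      simp only [List.mem_map] at hl
      obtain ⟨row, hrow, rfl⟩ := hl
      have h0 : ((g0 :: gs).getD row []).length = 0 := by
        rw [hpre ((g0 :: gs).getD row []) (pv_getD_mem _ _ _ (List.mem_range.mp hrow))]
        exact hc
      have h1 : (g0 :: gs).getD row [] = [] := List.length_eq_zero_iff.mp h0
      simp only [List.getD] at h1
      simp [h1]
    · rw [if_neg hc]
      congr 1
      apply List.map_congr_left
      intro row hrow
      have hrl : row < (g0 :: gs).length := List.mem_range.mp hrow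
      have hlen : ((g0 :: gs).getD row []).length = g0.length :=
        hpre _ (pv_getD_mem _ _ _ hrl)
      rw [hlen]
      apply List.map_congr_left
      intro col hcol
      have hcl : col < g0.length := List.mem_range.mp hcol
      rw [pv_getD_map (fun r => (PySem.List.max? r (fun x => x)).getD 0) (g0 :: gs) row 0 [] hrl,
        pv_getD_map
          (fun j => (g0 :: gs).foldl (fun cm r => if r.getD j 0 > cm then r.getD j 0 else cm) 0)
          (List.range g0.length) col 0 0 (by simpa using hcl),
        List.getD_eq_getElem (List.range g0.length) 0 (by simpa using hcl)]
      simp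

-- ===== VERDICT (by name: the statement is the Claim_ definition above) =====
theorem findMinVertically_spec : Claim_equal_findMinVertically := by
  intro grid _ hp
  exact findMinVertically_spec' grid hp
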